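-- pv_equiv track=rewrite | github.com/pypi-data/pypi-mirror-398 | packages/num2ltr/num2ltr-1.0.0-py3-none-any.whl/num2ltr/_functions.py | _groupByThrees
-- ===== SOURCE A (Python) =====
-- def _groupByThrees(n):
--     nArray = []
--     everyThree = 1
--
--     nSize = len(n)
--     lastIndex = nSize
--     i = nSize-1
--
--     while i >= 0:
--         if everyThree == 3:
--             nArray.insert(0, n[i:lastIndex])
--             lastIndex = i
--             everyThree = 1
--
--         elif i == 0:
--             nArray.insert(0, n[i:lastIndex])
--         else:
--             everyThree += 1
--
--         i -= 1
--
--     return nArray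
-- ===== SOURCE B (Python) =====
-- def _groupByThrees(n):
--     first = len(n) % 3
--     head = [n[0:first]] if first != 0 else []
--     return head + [n[i:i+3] for i in range(first, len(n), 3)]
-- ===== Notes on version B (the rewrite author's own statement) =====
-- stated objective: faster
-- what changed: Replaced A's backward per-character counter loop with insert(0) by computing the leading partial-group size as len(n) % 3 and slicing forward in steps of 3, appending groups in order.
import Mathlib
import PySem

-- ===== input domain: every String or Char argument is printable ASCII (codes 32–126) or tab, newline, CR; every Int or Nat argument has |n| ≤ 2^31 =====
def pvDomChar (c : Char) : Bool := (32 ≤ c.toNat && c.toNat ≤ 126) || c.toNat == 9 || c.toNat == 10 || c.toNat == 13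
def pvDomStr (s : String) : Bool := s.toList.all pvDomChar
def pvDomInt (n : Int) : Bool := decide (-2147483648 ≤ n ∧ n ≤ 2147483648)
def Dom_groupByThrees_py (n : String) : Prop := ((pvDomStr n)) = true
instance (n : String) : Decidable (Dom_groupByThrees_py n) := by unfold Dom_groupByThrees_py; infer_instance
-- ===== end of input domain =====

-- B groups the string with a precomputed head offset (len % 3) and one forward step-3
-- slicing pass, instead of A's backward per-character counter with insert(0); objective: simpler.

-- ===== PORT A =====
-- A's while loop, fuel-bounded (fuel ≥ number of iterations); state is exactly A's
-- (nArray, everyThree, lastIndex, i), insert(0, x) is cons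
def groupByThreesLoopA (n : String) (nArray : List String) (everyThree lastIndex i : Int) :
    Nat → List String
  | 0 => nArray
  | fuel + 1 =>
    if i ≥ 0 then
      if everyThree = 3 then
        groupByThreesLoopA n (PySem.Str.slice n (some i) (some lastIndex) :: nArray) 1 i (i - 1) fuel
      else if i = 0 then
        groupByThreesLoopA n (PySem.Str.slice n (some i) (some lastIndex) :: nArray) everyThree lastIndex (i - 1) fuel
      else
        groupByThreesLoopA n nArray (everyThree + 1) lastIndex (i - 1) fuel
    else nArray

def groupByThrees_py (n : String) : List String :=
  let nSize := PySem.Str.len n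
  groupByThreesLoopA n [] 1 nSize (nSize - 1) (nSize.toNat + 1)

-- ===== PORT B =====
def groupByThrees_py_alt (n : String) : List String :=
  let first := PySem.Int.mod (PySem.Str.len n) 3
  let head := if first ≠ 0 then [PySem.Str.slice n (some 0) (some first)] else []
  head ++ (PySem.List.pyRange first (PySem.Str.len n) 3).map
    (fun i => PySem.Str.slice n (some i) (some (i + 3)))

-- ===== PRECONDITION & SPEC =====
def Spec_groupByThrees_py (n : String) (out : List String) : Prop := out = groupByThrees_py_alt n
instance (n : String) (out : List String) : Decidable (Spec_groupByThrees_py n out) := by unfold Spec_groupByThrees_py; infer_instance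

-- ===== CLAIM (what is proved, stated in full; the proofs are below) =====
def Claim_equal_groupByThrees_py : Prop := ∀ (n : String), Dom_groupByThrees_py n → Spec_groupByThrees_py n (groupByThrees_py n)

-- ===== LEMMAS AND PROOFS =====

-- normal form both ports reduce to: head of size (length % 3), then chunks of 3, left to right
def chunkF : List Char → List String
  | [] => []
  | c :: t => String.ofList (c :: t.take 2) :: chunkF (t.drop 2)
termination_by l => l.length
decreasing_by simp

def stdGroups (l : List Char) : List String :=
  (if l.length % 3 = 0 then [] else [String.ofList (l.take (l.length % 3))]) ++
    chunkF (l.drop (l.length % 3))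

theorem chunkF_nil : chunkF [] = [] := by rw [chunkF]

theorem chunkF_ne_nil (l : List Char) (h : l ≠ []) :
    chunkF l = String.ofList (l.take 3) :: chunkF (l.drop 3) := by
  cases l with
  | nil => exact absurd rfl h
  | cons c t => rw [chunkF]; simp

theorem chunkF_append (u v : List Char) (hu : u.length % 3 = 0) :
    chunkF (u ++ v) = chunkF u ++ chunkF v := by
  induction u using chunkF.induct with
  | case1 => rw [chunkF]; simp
  | case2 c t ih =>
    have ht : 2 ≤ t.length := by simp at hu; omega
    rw [List.cons_append, chunkF, chunkF]
    rw [List.take_append_of_le_length ht, List.drop_append_of_le_length ht]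
    rw [ih (by simp at hu ⊢; omega)]
    simp

theorem chunkF_of_length_three (v : List Char) (hv : v.length = 3) :
    chunkF v = [String.ofList v] := by
  rw [chunkF_ne_nil v (by intro hc; rw [hc] at hv; simp at hv)]
  rw [List.take_of_length_le (by omega), List.drop_of_length_le (by omega), chunkF_nil]

theorem stdGroups_peel (l : List Char) (m : Nat) (h : m + 3 ≤ l.length) :
    stdGroups (l.take (m + 3)) =
      stdGroups (l.take m) ++ [String.ofList ((l.drop m).take 3)] := by
  have hlen3 : (l.take (m + 3)).length = m + 3 := by simp; omega
  have hlenm : (l.take m).length = m := by simp; omega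
  unfold stdGroups
  rw [hlen3, hlenm]
  have hmod : (m + 3) % 3 = m % 3 := by omega
  rw [hmod]
  have hsplit : l.take (m + 3) = l.take m ++ (l.drop m).take 3 := List.take_add
  have hdrop : (l.take (m + 3)).drop (m % 3) =
      (l.take m).drop (m % 3) ++ (l.drop m).take 3 := by
    rw [hsplit, List.drop_append_of_le_length (by rw [hlenm]; omega)]
  have htk : (l.take (m + 3)).take (m % 3) = (l.take m).take (m % 3) := by
    rw [hsplit, List.take_append_of_le_length (by rw [hlenm]; omega)]
  rw [hdrop, htk, chunkF_append _ _ (by rw [List.length_drop, hlenm]; omega)]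
  rw [chunkF_of_length_three ((l.drop m).take 3) (by rw [List.length_take, List.length_drop]; omega)]
  simp

theorem stdGroups_small (l : List Char) (e : Nat) (h1 : 1 ≤ e) (h3 : e ≤ 3)
    (hlen : l.length = e) : stdGroups l = [String.ofList l] := by
  unfold stdGroups
  rw [hlen]
  by_cases he : e = 3
  · subst he
    rw [if_pos (by omega), show (3 : Nat) % 3 = 0 from rfl, List.drop_zero,
        chunkF_of_length_three l hlen]
    simp
  · rw [show e % 3 = e from by omega, if_neg (by omega),
        List.take_of_length_le (by omega), List.drop_of_length_le (by omega), chunkF_nil]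
    simp

-- range(a, b, 3) induction forms
theorem pyRange3_nil (a b : Int) (h : b ≤ a) : PySem.List.pyRange a b 3 = [] := by
  rw [PySem.List.pyRange_of_pos a b (by norm_num)]
  simp [show ¬ a < b by omega]

theorem pyRange3_cons (a b : Int) (h : a < b) :
    PySem.List.pyRange a b 3 = a :: PySem.List.pyRange (a + 3) b 3 := by
  rw [PySem.List.pyRange_of_pos a b (by norm_num), PySem.List.pyRange_of_pos (a+3) b (by norm_num)]
  by_cases h3 : a + 3 < b
  · have e1 : ((b - a + 3 - 1) / 3).toNat = ((b - (a+3) + 3 - 1) / 3).toNat + 1 := by omega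
    simp only [h, if_pos, h3, e1, List.range_succ_eq_map]
    simp [List.map_map, Function.comp]
    intro k hk; ring
  · have e1 : ((b - a + 3 - 1) / 3).toNat = 1 := by omega
    simp [h, h3, e1, List.range_succ]

-- n[s : s+e] is a take of a drop of the character list
theorem slice_take (n : String) (s : Nat) (e : Int) (he : 0 ≤ e) :
    PySem.Str.slice n (some (s : Int)) (some ((s : Int) + e)) =
      String.ofList (((n.toList).drop s).take e.toNat) := by
  rw [show PySem.Str.slice n (some (s : Int)) (some ((s : Int) + e))
        = String.ofList (PySem.List.slice n.toList (some (s : Int)) (some ((s : Int) + e))) from rfl]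
  rw [PySem.List.slice_toNat _ (by positivity) (by omega)]
  congr 2
  omega

-- B's forward step-3 pass yields the chunks of the tail
theorem mapChunk (n : String) : ∀ k s : Nat, n.toList.length - s ≤ k → s ≤ n.toList.length →
    (n.toList.length - s) % 3 = 0 →
    (PySem.List.pyRange (s : Int) (n.toList.length : Int) 3).map
        (fun i => PySem.Str.slice n (some i) (some (i + 3))) =
      chunkF (n.toList.drop s) := by
  intro k
  induction k with
  | zero =>
    intro s hk hs _
    have hse : s = n.toList.length := by omega
    subst hse
    rw [pyRange3_nil _ _ (by omega), List.drop_length, chunkF_nil, List.map_nil]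
  | succ k ih =>
    intro s hk hs h3
    by_cases hlt : s < n.toList.length
    · have h3' : s + 3 ≤ n.toList.length := by omega
      rw [pyRange3_cons _ _ (by exact_mod_cast hlt), List.map_cons]
      have hc3 : ((s : Int) + 3) = ((s + 3 : Nat) : Int) := by push_cast; ring
      rw [hc3, ih (s + 3) (by omega) (by omega) (by omega)]
      have hne : List.drop s n.toList ≠ [] := by
        intro hc
        have := congrArg List.length hc
        rw [List.length_drop, List.length_nil] at this
        omega
      rw [chunkF_ne_nil _ hne]
      congr 1
      · rw [show PySem.Str.slice n (some (s : Int)) (some ((s + 3 : Nat) : Int))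
              = String.ofList (PySem.List.slice n.toList (some (s : Int)) (some ((s + 3 : Nat) : Int))) from rfl]
        rw [PySem.List.slice_toNat _ (by positivity) (by positivity)]
        simp only [Int.toNat_natCast]
        rw [show s + 3 - s = 3 from by omega]
      · rw [List.drop_drop]
    · have hse : s = n.toList.length := by omega
      subst hse
      rw [pyRange3_nil _ _ (by omega), List.drop_length, chunkF_nil, List.map_nil]

theorem alt_eq_stdGroups (n : String) : groupByThrees_py_alt n = stdGroups n.toList := by
  unfold groupByThrees_py_alt stdGroups
  dsimp only
  rw [PySem.Str.len_eq]
  rw [show PySem.Int.mod ((n.toList.length : Nat) : Int) 3 = ((n.toList.length % 3 : Nat) : Int) from by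
        exact_mod_cast PySem.Int.mod_natCast n.toList.length 3]
  rw [mapChunk n (n.toList.length) (n.toList.length % 3) (by omega) (by omega) (by omega)]
  congr 1
  by_cases h0 : n.toList.length % 3 = 0
  · rw [if_neg (show ¬(((n.toList.length % 3 : Nat) : Int) ≠ 0) from by
          rw [h0]; exact fun hc => hc rfl), if_pos h0]
  · rw [if_pos (show ((n.toList.length % 3 : Nat) : Int) ≠ 0 from
          fun hc => h0 (by exact_mod_cast hc)), if_neg h0]
    congr 1
    rw [show PySem.Str.slice n (some 0) (some ((n.toList.length % 3 : Nat) : Int))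
          = String.ofList (PySem.List.slice n.toList (some 0) (some ((n.toList.length % 3 : Nat) : Int))) from rfl]
    rw [PySem.List.slice_zero_start, PySem.List.slice_to_natCast]

theorem loopA_neg (n : String) (acc : List String) (e last i : Int) (hi : i < 0) :
    ∀ fuel, groupByThreesLoopA n acc e last i fuel = acc := by
  intro fuel
  cases fuel with
  | zero => rw [groupByThreesLoopA]
  | succ f => rw [groupByThreesLoopA, if_neg (by omega)]

-- A's loop invariant: lastIndex = i + everyThree; the loop prepends the groups of
-- the prefix n[0 : i + everyThree] onto the accumulator
theorem loopA_eq (n : String) : ∀ iN : Nat, ∀ e : Int, 1 ≤ e → e ≤ 3 →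
    iN + e.toNat ≤ n.toList.length → ∀ acc : List String, ∀ fuel : Nat, iN + 1 ≤ fuel →
    groupByThreesLoopA n acc e ((iN : Int) + e) (iN : Int) fuel =
      stdGroups (n.toList.take (iN + e.toNat)) ++ acc := by
  intro iN
  induction iN using Nat.strong_induction_on with
  | _ iN ih =>
    intro e he1 he3 hlen acc fuel hfuel
    obtain ⟨f, rfl⟩ : ∃ f, fuel = f + 1 := ⟨fuel - 1, by omega⟩
    rw [groupByThreesLoopA, if_pos (by positivity)]
    by_cases he : e = 3
    · subst he
      rw [if_pos rfl]
      rw [slice_take n iN 3 (by norm_num)]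
      by_cases hz : iN = 0
      · subst hz
        rw [show ((0 : Nat) : Int) - 1 = -1 from by norm_num, loopA_neg _ _ _ _ _ (by norm_num)]
        rw [stdGroups_small (n.toList.take (0 + (3:Int).toNat)) 3 (by norm_num) (by norm_num)
              (by rw [List.length_take]; omega)]
        simp
      · rw [show ((iN : Nat) : Int) - 1 = ((iN - 1 : Nat) : Int) from by omega,
            show ((iN : Nat) : Int) = ((iN - 1 : Nat) : Int) + 1 from by omega]
        rw [ih (iN - 1) (by omega) 1 (by norm_num) (by norm_num) (by omega) _ f (by omega)]
        rw [show (iN - 1) + (1 : Int).toNat = iN from by omega]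
        rw [show iN + (3 : Int).toNat = iN + 3 from rfl]
        rw [stdGroups_peel n.toList iN (by omega)]
        simp
    · rw [if_neg he]
      by_cases hz : iN = 0
      · subst hz
        rw [if_pos (show ((0 : Nat) : Int) = 0 from by norm_num)]
        rw [show ((0 : Nat) : Int) - 1 = -1 from by norm_num, loopA_neg _ _ _ _ _ (by norm_num)]
        rw [slice_take n 0 e (by omega)]
        rw [stdGroups_small (n.toList.take (0 + e.toNat)) e.toNat (by omega) (by omega)
              (by rw [List.length_take]; omega)]
        simp
      · rw [if_neg (by exact_mod_cast hz)]
        rw [show ((iN : Nat) : Int) - 1 = ((iN - 1 : Nat) : Int) from by omega,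
            show ((iN : Nat) : Int) + e = ((iN - 1 : Nat) : Int) + (e + 1) from by omega]
        rw [ih (iN - 1) (by omega) (e + 1) (by omega) (by omega) (by omega) _ f (by omega)]
        rw [show (iN - 1) + (e + 1).toNat = iN + e.toNat from by omega]

theorem a_eq_stdGroups (n : String) : groupByThrees_py n = stdGroups n.toList := by
  unfold groupByThrees_py
  dsimp only
  rw [PySem.Str.len_eq]
  by_cases hz : n.toList.length = 0
  · rw [hz]
    rw [show ((0 : Nat) : Int) - 1 = -1 from by norm_num, loopA_neg _ _ _ _ _ (by norm_num)]
    have : n.toList = [] := List.eq_nil_of_length_eq_zero hz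
    rw [this]
    unfold stdGroups
    simp [chunkF_nil]
  · rw [show ((n.toList.length : Nat) : Int) - 1 = ((n.toList.length - 1 : Nat) : Int) from by omega,
        show ((n.toList.length : Nat) : Int) = ((n.toList.length - 1 : Nat) : Int) + 1 from by omega]
    rw [loopA_eq n (n.toList.length - 1) 1 (by norm_num) (by norm_num) (by omega) []
          _ (by omega)]
    rw [show (n.toList.length - 1) + (1 : Int).toNat = n.toList.length from by omega]
    rw [List.take_of_length_le (by omega)]
    simp

-- ===== VERDICT (by name: the statement is the Claim_ definition above) =====
theorem groupByThrees_py_spec : Claim_equal_groupByThrees_py := by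
  intro n _
  unfold Spec_groupByThrees_py
  rw [a_eq_stdGroups, alt_eq_stdGroups]
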